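-- pv_equiv track=rewrite | github.com/DisruptiveLabs/comanage_nacha | comanage_nacha/utils/entry_formatter.py | _get_len_from_format_spec
-- ===== SOURCE A (Python) =====
-- def _get_len_from_format_spec(format_spec):
--     toks = list(reversed(format_spec))
--     while toks:
--         c, toks = toks[0], toks[1:]
--         if not toks or str.isalpha(c) and str.isdigit(toks[0]):
--             break
--     else:
--         return None
--
--     digits = ''
--     while toks:
--         c, toks = toks[0], toks[1:]
--         digits = c + digits
--         if not toks or not str.isdigit(toks[0]):
--             break
--
--     if digits:
--         return int(digits)
-- ===== SOURCE B (Python) =====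
-- def _get_len_from_format_spec(format_spec):
--     s = format_spec
--     i = len(s) - 1
--     while i >= 1:
--         if s[i].isalpha() and s[i - 1].isdigit():
--             j = i - 1
--             while j > 0 and s[j - 1].isdigit():
--                 j -= 1
--             return int(s[j:i])
--         i -= 1
--     return None
-- ===== Notes on version B (the rewrite author's own statement) =====
-- stated objective: faster
-- what changed: Replaced the reversed-list pop-and-reslice loops (toks[1:] copies the list on every step) with a single backward index scan plus a left-extension pointer and one slice, turning O(n^2) list copying into O(n) indexing.
import Mathlib
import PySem

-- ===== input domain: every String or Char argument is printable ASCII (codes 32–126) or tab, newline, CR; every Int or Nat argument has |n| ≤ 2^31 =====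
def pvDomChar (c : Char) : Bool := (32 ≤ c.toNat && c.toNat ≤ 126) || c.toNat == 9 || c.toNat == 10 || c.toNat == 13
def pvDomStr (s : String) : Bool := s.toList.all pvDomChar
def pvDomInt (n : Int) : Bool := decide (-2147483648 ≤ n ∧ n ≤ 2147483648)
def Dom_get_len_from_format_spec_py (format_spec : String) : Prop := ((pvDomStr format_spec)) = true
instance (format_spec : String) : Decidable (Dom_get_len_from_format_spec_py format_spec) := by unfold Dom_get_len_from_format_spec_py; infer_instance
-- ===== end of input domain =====

-- B replaces A's reversed-list pop-and-reslice loops by a single backward index scan: O(n) instead of O(n^2).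

-- ===== PORT A =====
-- first while loop: pop c from toks, break when toks is empty or (c alpha and toks[0] digit);
-- returns the remaining toks at the break, or none for the while-else (initially empty toks)
def pvA_loop1 : List Char → Option (List Char)
  | [] => none
  | c :: toks =>
    match toks with
    | [] => some []
    | t :: _ =>
      if PySem.Chars.isalpha c && PySem.Chars.isdigit t then some toks else pvA_loop1 toks

-- second while loop: pop c, digits = c + digits, break when toks empty or toks[0] not a digit
def pvA_loop2 : List Char → List Char → List Char
  | [], digits => digits
  | c :: toks, digits =>
    match toks with
    | [] => c :: digits
    | t :: _ =>
      if !PySem.Chars.isdigit t then c :: digits else pvA_loop2 toks (c :: digits)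

def get_len_from_format_spec_py (format_spec : String) : Option Int :=
  let toks := format_spec.toList.reverse
  match pvA_loop1 toks with
  | none => none
  | some toks =>
    let digits := pvA_loop2 toks []
    if digits ≠ [] then PySem.Int.ofChars? digits else none

-- ===== PORT B =====
-- inner while of B: j starts at i-1, moves left while the char before it is a digit
def pvB_run (cs : List Char) : Nat → Nat
  | 0 => 0
  | j + 1 => if PySem.Chars.isdigit (cs.getD j ' ') then pvB_run cs j else j + 1

-- outer while of B: i walks from len-1 down to 1 looking for s[i] alpha, s[i-1] digit
def pvB_outer (cs : List Char) : Nat → Option Int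
  | 0 => none
  | i + 1 =>
    if PySem.Chars.isalpha (cs.getD (i + 1) ' ') && PySem.Chars.isdigit (cs.getD i ' ') then
      let j := pvB_run cs i
      PySem.Int.ofChars? ((cs.drop j).take (i + 1 - j))     -- int(s[j:i]) with 0 ≤ j ≤ i < len
    else pvB_outer cs i

def get_len_from_format_spec_py_alt (format_spec : String) : Option Int :=
  let cs := format_spec.toList
  pvB_outer cs (cs.length - 1)

-- ===== PRECONDITION & SPEC =====
def Spec_get_len_from_format_spec_py (format_spec : String) (out : Option Int) : Prop := out = get_len_from_format_spec_py_alt format_spec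
instance (format_spec : String) (out : Option Int) : Decidable (Spec_get_len_from_format_spec_py format_spec out) := by unfold Spec_get_len_from_format_spec_py; infer_instance

-- ===== CLAIM (what is proved, stated in full; the proofs are below) =====
def Claim_equal_get_len_from_format_spec_py : Prop := ∀ (format_spec : String), Dom_get_len_from_format_spec_py format_spec → Spec_get_len_from_format_spec_py format_spec (get_len_from_format_spec_py format_spec)

-- ===== LEMMAS AND PROOFS =====

-- A's result as a function of the reversed character list
def pvAfrom (r : List Char) : Option Int :=
  match pvA_loop1 r with
  | none => none
  | some toks =>
    let digits := pvA_loop2 toks []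
    if digits ≠ [] then PySem.Int.ofChars? digits else none

theorem pvAfrom_eq (s : String) :
    get_len_from_format_spec_py s = pvAfrom s.toList.reverse := rfl

theorem pv_loop1_cons (a b : Char) (r : List Char) :
    pvA_loop1 (a :: b :: r)
      = if PySem.Chars.isalpha a && PySem.Chars.isdigit b then some (b :: r)
        else pvA_loop1 (b :: r) := rfl

theorem pv_loop2_cons (a b : Char) (r acc : List Char) :
    pvA_loop2 (a :: b :: r) acc
      = if !PySem.Chars.isdigit b then a :: acc else pvA_loop2 (b :: r) (a :: acc) := rfl

theorem pvAfrom_some (r t : List Char) (h : pvA_loop1 r = some t) :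
    pvAfrom r
      = (if pvA_loop2 t [] ≠ [] then PySem.Int.ofChars? (pvA_loop2 t []) else none) := by
  unfold pvAfrom
  rw [h]

theorem pvAfrom_step (a b : Char) (r : List Char)
    (h : ¬ ((PySem.Chars.isalpha a && PySem.Chars.isdigit b) = true)) :
    pvAfrom (a :: b :: r) = pvAfrom (b :: r) := by
  unfold pvAfrom
  rw [pv_loop1_cons, if_neg h]

theorem pv_takerev (cs : List Char) (k : Nat) (hk : k < cs.length) :
    (cs.take (k + 1)).reverse = cs[k] :: (cs.take k).reverse := by
  rw [List.take_add_one]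
  simp [hk]

theorem pvB_run_le (cs : List Char) (k : Nat) : pvB_run cs k ≤ k := by
  induction k with
  | zero => simp [pvB_run]
  | succ j ih =>
    simp only [pvB_run]
    split
    · omega
    · omega

theorem pv_loop2_eq (cs : List Char) (k : Nat) (hk : k < cs.length) (acc : List Char) :
    pvA_loop2 ((cs.take (k + 1)).reverse) acc
      = (cs.drop (pvB_run cs k)).take (k + 1 - pvB_run cs k) ++ acc := by
  induction k generalizing acc with
  | zero =>
    rw [pv_takerev cs 0 hk]
    simp [pvA_loop2, pvB_run, List.take_add_one, hk]
  | succ j ih =>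
    have hj : j < cs.length := by omega
    rw [pv_takerev cs (j + 1) hk, pv_takerev cs j hj, pv_loop2_cons]
    have hget : cs.getD j ' ' = cs[j] := List.getD_eq_getElem cs ' ' hj
    by_cases hd : PySem.Chars.isdigit cs[j] = true
    · have hrun : pvB_run cs (j + 1) = pvB_run cs j := by
        simp only [pvB_run, hget, hd, if_true]
      rw [if_neg (by simp [hd]), hrun]
      have hIH := ih hj (cs[j + 1] :: acc)
      rw [pv_takerev cs j hj] at hIH
      rw [hIH]
      have hle := pvB_run_le cs j
      set p := pvB_run cs j with hp
      have h1 : (cs.drop p).take (j + 1 + 1 - p) = (cs.drop p).take (j + 1 - p) ++ [cs[j + 1]] := by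
        have h2 : j + 1 + 1 - p = (j + 1 - p) + 1 := by omega
        rw [h2, List.take_add_one]
        have h3 : (cs.drop p)[j + 1 - p]? = some cs[j + 1] := by
          rw [List.getElem?_drop]
          have h4 : p + (j + 1 - p) = j + 1 := by omega
          rw [h4, List.getElem?_eq_getElem hk]
        simp [h3]
      rw [h1]
      simp
    · have hd' : PySem.Chars.isdigit cs[j] = false := by
        revert hd; cases PySem.Chars.isdigit cs[j] <;> simp
      have hrun : pvB_run cs (j + 1) = j + 1 := by
        simp only [pvB_run, hget, hd']
        simp
      rw [if_pos (by simp [hd']), hrun]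
      have h5 : (cs.drop (j + 1)).take (j + 1 + 1 - (j + 1)) = [cs[j + 1]] := by
        have h6 : j + 1 + 1 - (j + 1) = 1 := by omega
        rw [h6, List.take_one]
        have h7 : (cs.drop (j + 1))[0]? = some cs[j + 1] := by
          rw [List.getElem?_drop]
          simp [List.getElem?_eq_getElem hk]
        simp [List.head?_eq_getElem?, h7]
      rw [h5]
      rfl

theorem pv_main (cs : List Char) (k : Nat) (hk : k < cs.length) :
    pvB_outer cs k = pvAfrom ((cs.take (k + 1)).reverse) := by
  induction k with
  | zero =>
    rw [pv_takerev cs 0 hk]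
    simp [pvB_outer, pvAfrom, pvA_loop1, pvA_loop2]
  | succ j ih =>
    have hj : j < cs.length := by omega
    rw [pv_takerev cs (j + 1) hk, pv_takerev cs j hj]
    have hg1 : cs.getD (j + 1) ' ' = cs[j + 1] := List.getD_eq_getElem cs ' ' hk
    have hg0 : cs.getD j ' ' = cs[j] := List.getD_eq_getElem cs ' ' hj
    simp only [pvB_outer, hg1, hg0]
    by_cases hc : (PySem.Chars.isalpha cs[j + 1] && PySem.Chars.isdigit cs[j]) = true
    · rw [if_pos hc]
      have hb : pvA_loop1 (cs[j + 1] :: cs[j] :: (cs.take j).reverse)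
          = some (cs[j] :: (cs.take j).reverse) := by
        rw [pv_loop1_cons, if_pos hc]
      rw [pvAfrom_some _ _ hb]
      have hd := pv_loop2_eq cs j hj []
      rw [pv_takerev cs j hj] at hd
      rw [hd]
      have hle := pvB_run_le cs j
      set p := pvB_run cs j with hp
      have hne : (cs.drop p).take (j + 1 - p) ++ ([] : List Char) ≠ [] := by
        simp
        constructor <;> omega
      rw [if_pos hne]
      simp
    · rw [if_neg hc, ih hj, pv_takerev cs j hj, pvAfrom_step _ _ _ hc]

theorem pv_ports_agree (s : String) :
    get_len_from_format_spec_py s = get_len_from_format_spec_py_alt s := by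
  rw [pvAfrom_eq]
  show pvAfrom s.toList.reverse = pvB_outer s.toList (s.toList.length - 1)
  rcases hcs : s.toList with _ | ⟨c, rest⟩
  · simp [pvAfrom, pvA_loop1, pvB_outer]
  · have hlen : (c :: rest).length - 1 < (c :: rest).length := by simp
    rw [pv_main (c :: rest) ((c :: rest).length - 1) hlen]
    have h8 : (c :: rest).length - 1 + 1 = (c :: rest).length := by simp
    rw [h8, List.take_length]

-- ===== VERDICT (by name: the statement is the Claim_ definition above) =====
theorem get_len_from_format_spec_py_spec : Claim_equal_get_len_from_format_spec_py := by
  intro s _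
  show get_len_from_format_spec_py s = get_len_from_format_spec_py_alt s
  exact pv_ports_agree s
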